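-- pv_equiv track=rewrite | github.com/LightPotatoDev/baekjoon | math/linearAlgebra/autoSprinkle.py | same_rc
-- ===== SOURCE A (Python) =====
-- SIZE = 8
--
-- def same_rc(y,x):
--     L = []
--     for i in range(SIZE):
--         for j in range(SIZE):
--             if y == i or x == j:
--                 L.append(1)
--             else:
--                 L.append(0)
--     return L
-- ===== SOURCE B (Python) =====
-- SIZE = 8
--
-- def same_rc(y, x):
--     L = [0] * (SIZE * SIZE)
--     if 0 <= y < SIZE:
--         for j in range(SIZE):
--             L[y * SIZE + j] = 1
--     if 0 <= x < SIZE: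
--         for i in range(SIZE):
--             L[i * SIZE + x] = 1
--     return L
-- ===== Notes on version B (the rewrite author's own statement) =====
-- stated objective: simpler
-- what changed: Instead of testing each of the 64 cells with a nested loop, B pre-allocates a zero buffer and stamps the whole marked row and the whole marked column in two independent guarded passes.
import Mathlib
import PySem

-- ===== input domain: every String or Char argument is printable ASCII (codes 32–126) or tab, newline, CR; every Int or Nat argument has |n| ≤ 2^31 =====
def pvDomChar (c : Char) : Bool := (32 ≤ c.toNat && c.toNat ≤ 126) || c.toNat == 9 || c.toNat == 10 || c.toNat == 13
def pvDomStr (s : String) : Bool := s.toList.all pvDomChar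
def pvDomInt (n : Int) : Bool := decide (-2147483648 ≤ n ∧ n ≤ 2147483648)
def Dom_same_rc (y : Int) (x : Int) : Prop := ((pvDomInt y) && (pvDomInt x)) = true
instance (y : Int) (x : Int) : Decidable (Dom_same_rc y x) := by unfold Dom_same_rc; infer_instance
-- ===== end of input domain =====

-- B replaces A's 64 per-cell tests by stamping the marked row and the marked column onto a zero buffer (simpler decomposition).

-- ===== PORT A =====
def same_rc (y : Int) (x : Int) : List Int :=
  (PySem.List.pyRange 0 8 1).foldl (fun L i =>
    (PySem.List.pyRange 0 8 1).foldl (fun L j =>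
      L ++ [if y == i || x == j then 1 else 0]) L) []

-- ===== PORT B =====
-- List.set with .toNat is exact here: the guard 0 ≤ y < 8 (resp. x) makes the index a nonnegative in-range Python index.
def same_rc_alt (y : Int) (x : Int) : List Int :=
  let L0 : List Int := List.replicate 64 0
  let L1 : List Int :=
    if 0 ≤ y ∧ y < 8 then
      (PySem.List.pyRange 0 8 1).foldl (fun L j => L.set (y * 8 + j).toNat 1) L0
    else L0
  if 0 ≤ x ∧ x < 8 then
    (PySem.List.pyRange 0 8 1).foldl (fun L i => L.set (i * 8 + x).toNat 1) L1
  else L1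

-- ===== PRECONDITION & SPEC =====
def Spec_same_rc (y : Int) (x : Int) (out : List Int) : Prop := out = same_rc_alt y x
instance (y : Int) (x : Int) (out : List Int) : Decidable (Spec_same_rc y x out) := by unfold Spec_same_rc; infer_instance

-- ===== CLAIM (what is proved, stated in full; the proofs are below) =====
def Claim_equal_same_rc : Prop := ∀ (y : Int) (x : Int), Dom_same_rc y x → Spec_same_rc y x (same_rc y x)

-- ===== LEMMAS AND PROOFS =====

-- normalize an out-of-range coordinate to -1 (which also matches no cell)
def pvNorm (n : Int) : Int := if 0 ≤ n ∧ n < 8 then n else -1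

theorem pvNorm_beq (n i : Int) (h0 : 0 ≤ i) (h8 : i < 8) : (n == i) = (pvNorm n == i) := by
  unfold pvNorm
  split_ifs with h
  · rfl
  · have h1 : n ≠ i := by omega
    have h2 : (-1 : Int) ≠ i := by omega
    simp [h1, h2]

theorem same_rc_norm (y x : Int) : same_rc y x = same_rc (pvNorm y) (pvNorm x) := by
  have ey := fun i h0 h8 => pvNorm_beq y i h0 h8
  have ex := fun j h0 h8 => pvNorm_beq x j h0 h8
  have hr : PySem.List.pyRange 0 8 1 = [0,1,2,3,4,5,6,7] := by decide
  simp only [same_rc, hr, List.foldl]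
  simp only [ey 0 (by norm_num) (by norm_num), ey 1 (by norm_num) (by norm_num),
    ey 2 (by norm_num) (by norm_num), ey 3 (by norm_num) (by norm_num),
    ey 4 (by norm_num) (by norm_num), ey 5 (by norm_num) (by norm_num),
    ey 6 (by norm_num) (by norm_num), ey 7 (by norm_num) (by norm_num),
    ex 0 (by norm_num) (by norm_num), ex 1 (by norm_num) (by norm_num),
    ex 2 (by norm_num) (by norm_num), ex 3 (by norm_num) (by norm_num),
    ex 4 (by norm_num) (by norm_num), ex 5 (by norm_num) (by norm_num),
    ex 6 (by norm_num) (by norm_num), ex 7 (by norm_num) (by norm_num)]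

theorem same_rc_alt_norm (y x : Int) : same_rc_alt y x = same_rc_alt (pvNorm y) (pvNorm x) := by
  unfold same_rc_alt pvNorm
  by_cases hy : 0 ≤ y ∧ y < 8 <;> by_cases hx : 0 ≤ x ∧ x < 8 <;>
    simp [hy, hx]

theorem pvNorm_range (n : Int) : -1 ≤ pvNorm n ∧ pvNorm n < 8 := by
  unfold pvNorm; split_ifs with h <;> omega

theorem same_rc_spec : Claim_equal_same_rc := by
  intro y x _
  unfold Spec_same_rc
  rw [same_rc_norm, same_rc_alt_norm]
  obtain ⟨hy1, hy2⟩ := pvNorm_range y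
  obtain ⟨hx1, hx2⟩ := pvNorm_range x
  interval_cases (pvNorm y) <;> interval_cases (pvNorm x) <;> decide
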